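-- pv_equiv track=rewrite | github.com/pr3t3l/openclaw-config | skills/finance-tracker-v2/src/scripts/lib/ai_parser.py | _pick_cheapest_model
-- ===== SOURCE A (Python) =====
-- def _pick_cheapest_model(models: list[str]) -> str:
--     """Pick the smallest/cheapest model from a list for parsing tasks."""
--     # Prefer small/mini models for parsing (cheap + fast)
--     preferences = [
--         "gpt-4.1-mini", "gpt-4o-mini", "gpt-4.1-nano",
--         "claude-3-5-haiku", "claude-haiku", "claude-3-haiku",
--         "gemini-2.0-flash", "gemini-1.5-flash",
--         "gpt-3.5-turbo",
--     ]
--     for pref in preferences: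
--         for m in models:
--             if pref in m.lower():
--                 return m
--     # Fallback: shortest model name (heuristic: shorter = simpler)
--     return min(models, key=len) if models else ""
-- ===== SOURCE B (Python) =====
-- def _pick_cheapest_model(models: list[str]) -> str:
--     """Rank each model by the preference list, then take a single stable argmin."""
--     preferences = [
--         "gpt-4.1-mini", "gpt-4o-mini",
--         "gpt-4.1-nano", "claude-3-5-haiku",
--         "claude-haiku", "claude-3-haiku",
--         "gemini-2.0-flash", "gemini-1.5-flash",
--         "gpt-3.5-turbo",
--     ]
--     if not models:
--         return ""
--     n = len(preferences)
--
--     def rank(m):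
--         ml = m.lower()
--         return next((i for i, p in enumerate(preferences) if p in ml), n)
--
--     # min is stable: preference priority first, then model order.
--     best = min(models, key=rank)
--     if rank(best) < n:
--         return best
--     # No preference matched any model: shortest name wins.
--     return min(models, key=len)
-- ===== Notes on version B (the rewrite author's own statement) =====
-- stated objective: alternative
-- what changed: Replaces the preference-outer nested early-return scan with a per-model rank key (index of first matching preference) and a single stable argmin pass over the models.
import Mathlib
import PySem

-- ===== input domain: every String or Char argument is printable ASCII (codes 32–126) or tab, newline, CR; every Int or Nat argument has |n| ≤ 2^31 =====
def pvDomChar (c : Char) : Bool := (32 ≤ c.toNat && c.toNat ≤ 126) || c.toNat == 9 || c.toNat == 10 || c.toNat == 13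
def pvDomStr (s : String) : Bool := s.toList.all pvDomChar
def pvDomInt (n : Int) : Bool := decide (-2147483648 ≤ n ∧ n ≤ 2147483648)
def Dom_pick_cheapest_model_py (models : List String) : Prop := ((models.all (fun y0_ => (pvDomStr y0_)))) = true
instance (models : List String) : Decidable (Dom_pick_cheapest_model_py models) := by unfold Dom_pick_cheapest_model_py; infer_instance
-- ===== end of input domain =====

-- B replaces A's preference-outer nested early-return scan with a per-model rank key and one stable argmin pass (alternative decomposition, same cost).


-- ===== PORT A =====
-- inner loop: first m in models with pref in m.lower()
def pvFindModelA (pref : String) : List String → Option String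
  | [] => none
  | m :: rest =>
      if PySem.Str.isIn pref (PySem.Str.lower m) then some m else pvFindModelA pref rest

-- outer loop over preferences with early return
def pvScanA : List String → List String → Option String
  | [], _ => none
  | p :: ps, models =>
      match pvFindModelA p models with
      | some m => some m
      | none => pvScanA ps models

def pick_cheapest_model_py (models : List String) : String :=
  let preferences : List String :=
    ["gpt-4.1-mini", "gpt-4o-mini", "gpt-4.1-nano",
     "claude-3-5-haiku", "claude-haiku", "claude-3-haiku",
     "gemini-2.0-flash", "gemini-1.5-flash",
     "gpt-3.5-turbo"]
  match pvScanA preferences models with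
  | some m => m
  | none =>
      match models with
      | [] => ""
      | _ => (PySem.List.min? models PySem.Str.len).getD ""

-- ===== PORT B =====
-- next((i for i, p in enumerate(preferences) if p in ml), n): index of first match, or length
def pvGoRank : List String → String → Nat
  | [], _ => 0
  | p :: ps, ml => if PySem.Str.isIn p ml then 0 else 1 + pvGoRank ps ml

-- rank(m) (closure over preferences); returns preferences.length when nothing matches
def pvRankB (preferences : List String) (m : String) : Nat :=
  pvGoRank preferences (PySem.Str.lower m)

def pick_cheapest_model_py_alt (models : List String) : String :=
  let preferences : List String :=
    ["gpt-4.1-mini", "gpt-4o-mini", "gpt-4.1-nano",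
     "claude-3-5-haiku", "claude-haiku", "claude-3-haiku",
     "gemini-2.0-flash", "gemini-1.5-flash",
     "gpt-3.5-turbo"]
  if models.isEmpty then ""
  else
    let n := preferences.length
    let best := (PySem.List.min? models (pvRankB preferences)).getD ""
    if pvRankB preferences best < n then best
    else (PySem.List.min? models PySem.Str.len).getD ""

-- ===== PRECONDITION & SPEC =====
def Spec_pick_cheapest_model_py (models : List String) (out : String) : Prop := out = pick_cheapest_model_py_alt models
instance (models : List String) (out : String) : Decidable (Spec_pick_cheapest_model_py models out) := by unfold Spec_pick_cheapest_model_py; infer_instance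

-- ===== CLAIM (what is proved, stated in full; the proofs are below) =====
def Claim_equal_pick_cheapest_model_py : Prop := ∀ (models : List String), Dom_pick_cheapest_model_py models → Spec_pick_cheapest_model_py models (pick_cheapest_model_py models)

-- ===== LEMMAS AND PROOFS =====

-- proof-side name for the preference list both ports write out literally
def pvPrefs : List String :=
  ["gpt-4.1-mini", "gpt-4o-mini", "gpt-4.1-nano",
   "claude-3-5-haiku", "claude-haiku", "claude-3-haiku",
   "gemini-2.0-flash", "gemini-1.5-flash",
   "gpt-3.5-turbo"]

-- the step function of PySem.List.min? (first-minimal fold)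
def pvStep (k : String → Nat) : Option String → String → Option String :=
  fun acc x =>
    match acc with
    | none => some x
    | some m => if k x < k m then some x else some m

lemma pvMin?_eq_foldl (k : String → Nat) (xs : List String) :
    PySem.List.min? xs k = List.foldl (pvStep k) none xs := by
  unfold PySem.List.min?
  congr 1
  funext acc x
  cases acc <;> rfl

-- bridge: Str.isIn/lower in the ports vs the Chars normal form simp produces
lemma pvIsIn_char (p x : String) :
    PySem.Str.isIn p (PySem.Str.lower x) = PySem.Chars.isIn p.toList (PySem.Chars.lower x.toList) := by
  simp

-- first element of xs whose key is 0
def pvFirstZero (k : String → Nat) : List String → Option String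
  | [] => none
  | x :: t => if k x = 0 then some x else pvFirstZero k t

lemma pvFirstZero_mem (k : String → Nat) :
    ∀ (xs : List String) (m : String), pvFirstZero k xs = some m → m ∈ xs := by
  intro xs
  induction xs with
  | nil => intro m h; simp [pvFirstZero] at h
  | cons x t ih =>
      intro m h
      simp only [pvFirstZero] at h
      split at h
      · cases h; exact List.mem_cons_self
      · exact List.mem_cons_of_mem _ (ih m h)

lemma pvFoldl_keep_zero (k : String → Nat) (a : String) (ha : k a = 0) :
    ∀ (xs : List String), List.foldl (pvStep k) (some a) xs = some a := by
  intro xs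
  induction xs with
  | nil => rfl
  | cons x t ih => simp [pvStep, ha, ih]

lemma pvFoldl_first_zero (k : String → Nat) :
    ∀ (xs : List String) (acc : Option String) (m : String),
      (∀ a, acc = some a → k a ≠ 0) → pvFirstZero k xs = some m →
      List.foldl (pvStep k) acc xs = some m := by
  intro xs
  induction xs with
  | nil => intro acc m _ h; simp [pvFirstZero] at h
  | cons x t ih =>
      intro acc m hacc h
      simp only [pvFirstZero] at h
      by_cases hx : k x = 0
      · rw [if_pos hx] at h
        obtain rfl : x = m := by injection h
        cases acc with
        | none => simpa [pvStep] using pvFoldl_keep_zero k x hx t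
        | some a =>
            have h0 : 0 < k a := by
              have := hacc a rfl; omega
            simp only [List.foldl_cons, pvStep, hx, if_pos h0]
            exact pvFoldl_keep_zero k x hx t
      · rw [if_neg hx] at h
        cases acc with
        | none =>
            simp only [List.foldl_cons, pvStep]
            exact ih (some x) m (by intro a ha; cases ha; exact hx) h
        | some a =>
            simp only [List.foldl_cons, pvStep]
            split
            · exact ih (some x) m (by intro b hb; cases hb; exact hx) h
            · exact ih (some a) m hacc h

lemma pvFoldl_shift (k1 k2 : String → Nat) :
    ∀ (xs : List String) (acc : Option String),
      (∀ x ∈ xs, k1 x = 1 + k2 x) → (∀ a, acc = some a → k1 a = 1 + k2 a) →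
      List.foldl (pvStep k1) acc xs = List.foldl (pvStep k2) acc xs := by
  intro xs
  induction xs with
  | nil => intro acc _ _; rfl
  | cons x t ih =>
      intro acc hxs hacc
      have hx : k1 x = 1 + k2 x := hxs x List.mem_cons_self
      have ht : ∀ y ∈ t, k1 y = 1 + k2 y := fun y hy => hxs y (List.mem_cons_of_mem _ hy)
      cases acc with
      | none =>
          simp only [List.foldl_cons, pvStep]
          exact ih (some x) ht (by intro a ha; cases ha; exact hx)
      | some a =>
          have ha : k1 a = 1 + k2 a := hacc a rfl
          have hiff : k1 x < k1 a ↔ k2 x < k2 a := by omega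
          simp only [List.foldl_cons, pvStep]
          by_cases hlt : k2 x < k2 a
          · rw [if_pos (hiff.mpr hlt), if_pos hlt]
            exact ih (some x) ht (by intro b hb; cases hb; exact hx)
          · rw [if_neg (fun h => hlt (hiff.mp h)), if_neg hlt]
            exact ih (some a) ht hacc

lemma pvFindModelA_eq_firstZero (p : String) (ps : List String) :
    ∀ (xs : List String),
      pvFindModelA p xs = pvFirstZero (fun x => pvGoRank (p :: ps) (PySem.Str.lower x)) xs := by
  intro xs
  induction xs with
  | nil => rfl
  | cons x t ih =>
      simp only [pvFindModelA, pvFirstZero, pvGoRank]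
      by_cases hx : PySem.Chars.isIn p.toList (PySem.Chars.lower x.toList) = true
      · simp [hx]
      · simp [hx, ih, pvGoRank]

lemma pvFindModelA_none (p : String) :
    ∀ (xs : List String), pvFindModelA p xs = none →
      ∀ x ∈ xs, PySem.Chars.isIn p.toList (PySem.Chars.lower x.toList) = false := by
  intro xs
  induction xs with
  | nil => intro _ x hx; simp at hx
  | cons y t ih =>
      intro h x hx
      simp only [pvFindModelA] at h
      split at h
      · exact absurd h (by simp)
      · rcases List.mem_cons.mp hx with rfl | hx'
        · have := ‹¬ PySem.Str.isIn p (PySem.Str.lower x) = true›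
          rw [pvIsIn_char] at this
          simpa using this
        · exact ih h x hx'

lemma pvScanA_some :
    ∀ (ps models : List String) (m : String), pvScanA ps models = some m →
      m ∈ models ∧ pvGoRank ps (PySem.Str.lower m) < ps.length ∧
      List.foldl (pvStep (fun x => pvGoRank ps (PySem.Str.lower x))) none models = some m := by
  intro ps
  induction ps with
  | nil => intro models m h; simp [pvScanA] at h
  | cons p ps ih =>
      intro models m h
      simp only [pvScanA] at h
      cases hf : pvFindModelA p models with
      | some m' =>
          rw [hf] at h; cases h
          have hfz := (pvFindModelA_eq_firstZero p ps models) ▸ hf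
          refine ⟨pvFirstZero_mem _ models m hfz, ?_, ?_⟩
          · -- m matched p, so its rank is 0 < length
            have hmem := pvFirstZero_mem _ models m hfz
            -- rank of m w.r.t. p :: ps: firstZero found k m = 0
            have : pvGoRank (p :: ps) (PySem.Str.lower m) = 0 := by
              -- from pvFirstZero: the found element has key 0
              clear ih hf
              induction models with
              | nil => simp [pvFirstZero] at hfz
              | cons y t iht =>
                  simp only [pvFirstZero] at hfz
                  split at hfz
                  · cases hfz; assumption
                  · exact iht hfz (pvFirstZero_mem _ t m hfz)
            simp [this]
          · exact pvFoldl_first_zero _ models none m (by intro a ha; cases ha) hfz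
      | none =>
          rw [hf] at h
          obtain ⟨hmem, hlt, hfold⟩ := ih models m h
          have hnone := pvFindModelA_none p models hf
          have hshift : ∀ x ∈ models,
              pvGoRank (p :: ps) (PySem.Str.lower x) = 1 + pvGoRank ps (PySem.Str.lower x) := by
            intro x hx
            simp [pvGoRank, hnone x hx]
          refine ⟨hmem, ?_, ?_⟩
          · rw [hshift m hmem]; simp only [List.length_cons]; omega
          · rw [pvFoldl_shift _ _ models none hshift (by intro a ha; cases ha)]
            exact hfold

lemma pvScanA_none :
    ∀ (ps models : List String), pvScanA ps models = none →
      ∀ x ∈ models, pvGoRank ps (PySem.Str.lower x) = ps.length := by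
  intro ps
  induction ps with
  | nil => intro models _ x _; rfl
  | cons p ps ih =>
      intro models h x hx
      simp only [pvScanA] at h
      cases hf : pvFindModelA p models with
      | some m' => rw [hf] at h; cases h
      | none =>
          rw [hf] at h
          have := pvFindModelA_none p models hf x hx
          simp [pvGoRank, this, ih models h x hx, Nat.add_comm]

-- pvScanA over an empty model list always fails
lemma pvScanA_nil : ∀ (ps : List String), pvScanA ps [] = none := by
  intro ps
  induction ps with
  | nil => rfl
  | cons p ps ih => simp [pvScanA, pvFindModelA, ih]

-- ===== VERDICT (by name: the statement is the Claim_ definition above) =====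
theorem pick_cheapest_model_py_spec : Claim_equal_pick_cheapest_model_py := by
  intro models _
  unfold Spec_pick_cheapest_model_py pick_cheapest_model_py pick_cheapest_model_py_alt
  rw [show (["gpt-4.1-mini", "gpt-4o-mini", "gpt-4.1-nano", "claude-3-5-haiku", "claude-haiku",
             "claude-3-haiku", "gemini-2.0-flash", "gemini-1.5-flash", "gpt-3.5-turbo"] : List String)
        = pvPrefs from rfl]
  cases models with
  | nil => simp [pvScanA_nil]
  | cons y ys =>
      cases h : pvScanA pvPrefs (y :: ys) with
      | some m =>
          obtain ⟨hmem, hlt, hfold⟩ := pvScanA_some pvPrefs (y :: ys) m h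
          have hmin : PySem.List.min? (y :: ys) (pvRankB pvPrefs) = some m := by
            rw [pvMin?_eq_foldl]
            exact hfold
          have hlen : pvPrefs.length = 9 := rfl
          have hlt' : pvGoRank pvPrefs (PySem.Str.lower m) < 9 := hlen ▸ hlt
          simp [h, hmin, pvRankB, hlen]
          intro hc
          omega
      | none =>
          have hall := pvScanA_none pvPrefs (y :: ys) h
          obtain ⟨b, hb⟩ : ∃ b, PySem.List.min? (y :: ys) (pvRankB pvPrefs) = some b := by
            cases hm : PySem.List.min? (y :: ys) (pvRankB pvPrefs) with
            | none =>
                exact absurd ((PySem.List.min?_eq_none_iff (y :: ys) (pvRankB pvPrefs)).mp hm)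
                  (by simp)
            | some b => exact ⟨b, rfl⟩
          have hbmem : b ∈ (y :: ys) := PySem.List.min?_mem hb
          have hlen : pvPrefs.length = 9 := rfl
          have hbrank : pvGoRank pvPrefs (PySem.Str.lower b) = 9 := hlen ▸ hall b hbmem
          simp [h, hb, pvRankB, hbrank, hlen]
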